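-- pv_equiv track=rewrite | github.com/KS-Limmattal/infos-and-snippets | solutions/uebung-1.5/main2.py | letzteVerdopplung
-- ===== SOURCE A (Python) =====
-- def letzteVerdopplung(li):
--     """Liefert den letzten Listeneintrag zurück, der einen verdoppelten Buchstaben (wie in 'doppelt', aber nicht
--     wie in 'Papa' oder 'Aare') enthält. Belässt die gegebene Liste unverändert.
--
--     :param li: eine Liste bestehend aus Zeichenketten
--     :return: der letzte Listeneintrag mit verdoppeltem Buchstaben bzw. eine leere Zeichenkette, falls kein Listeintrag
--              einen verdoppelten Buchstaben enthält
--     """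
--
--     revLi = li.copy()
--     revLi.reverse()  # originale Liste bleibt unverändert
--     for l in revLi:
--         for i in range(len(l)-1):
--             if l[i]==l[i+1]:
--                 return l
--     return ""
-- ===== SOURCE B (Python) =====
-- def letzteVerdopplung(li):
--     """Liefert den letzten Listeneintrag mit verdoppeltem Buchstaben (sonst "")."""
--     result = ""
--     for s in li:
--         if any(a == b for a, b in zip(s, s[1:])):
--             result = s
--     return result
-- ===== Notes on version B (the rewrite author's own statement) =====
-- stated objective: simpler
-- what changed: Single forward pass with a last-match accumulator and a zip-of-adjacent-pairs test, instead of copying and reversing the list and returning the first match of an index-based double scan.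
import Mathlib
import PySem

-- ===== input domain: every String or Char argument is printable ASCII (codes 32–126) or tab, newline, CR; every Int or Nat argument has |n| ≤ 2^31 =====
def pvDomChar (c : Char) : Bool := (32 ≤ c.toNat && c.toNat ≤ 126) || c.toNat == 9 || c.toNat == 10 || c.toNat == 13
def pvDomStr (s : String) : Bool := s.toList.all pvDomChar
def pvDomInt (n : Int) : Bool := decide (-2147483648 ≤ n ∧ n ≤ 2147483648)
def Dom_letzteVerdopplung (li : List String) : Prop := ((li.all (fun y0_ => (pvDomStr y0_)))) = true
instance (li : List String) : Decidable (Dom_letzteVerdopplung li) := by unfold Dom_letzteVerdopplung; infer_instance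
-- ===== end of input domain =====

-- B replaces A's copy+reverse+first-match scan by one forward pass keeping the last
-- qualifying string in an accumulator (objective: simpler; return values identical).

-- ===== PORT A =====
-- inner loop: for i in range(len(l)-1): if l[i]==l[i+1]: return l  (as a Bool)
def pvInnerA (cs : List Char) : List Int → Bool
  | [] => false
  | i :: rest =>
    if PySem.List.pyGet? cs i == PySem.List.pyGet? cs (i + 1) then true
    else pvInnerA cs rest

-- outer loop: for l in revLi: … return l / fall through to ""
def pvOuterA : List String → String
  | [] => ""
  | l :: rest =>
    if pvInnerA l.toList (PySem.List.pyRange 0 ((l.toList.length : Int) - 1) 1) then l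
    else pvOuterA rest

def letzteVerdopplung (li : List String) : String :=
  let revLi := li.reverse   -- li.copy(); revLi.reverse()
  pvOuterA revLi

-- ===== PORT B =====
-- any(a == b for a, b in zip(s, s[1:]))
def pvHat (s : String) : Bool :=
  (s.toList.zip s.toList.tail).any (fun p => p.1 == p.2)

def letzteVerdopplung_alt (li : List String) : String :=
  li.foldl (fun result s => if pvHat s then s else result) ""

-- ===== PRECONDITION & SPEC =====
def Spec_letzteVerdopplung (li : List String) (out : String) : Prop := out = letzteVerdopplung_alt li
instance (li : List String) (out : String) : Decidable (Spec_letzteVerdopplung li out) := by unfold Spec_letzteVerdopplung; infer_instance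

-- ===== CLAIM (what is proved, stated in full; the proofs are below) =====
def Claim_equal_letzteVerdopplung : Prop := ∀ (li : List String), Dom_letzteVerdopplung li → Spec_letzteVerdopplung li (letzteVerdopplung li)

-- ===== LEMMAS AND PROOFS =====

-- A's index scan, started at k, tests adjacent pairs of the suffix cs.drop k.
theorem pvInnerA_aux (cs : List Char) (k : ℕ) :
    pvInnerA cs (PySem.List.pyRange k ((cs.length : Int) - 1) 1)
      = ((cs.drop k).zip (cs.drop k).tail).any (fun p => p.1 == p.2) := by
  by_cases hk : (cs.length : Int) - 1 ≤ (k : Int)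
  · rw [PySem.List.pyRange_one_eq_nil hk]
    have hlen : (cs.drop k).length ≤ 1 := by
      have : cs.length ≤ k + 1 := by exact_mod_cast (by omega : (cs.length : Int) ≤ (k : Int) + 1)
      simp; omega
    match hd : cs.drop k, hlen with
    | [], _ => simp [pvInnerA]
    | [a], _ => simp [pvInnerA]
  · have hk1 : (k : Int) < (cs.length : Int) - 1 := lt_of_not_ge hk
    have hklen : k + 1 < cs.length := by exact_mod_cast (by omega : (k : Int) + 1 < (cs.length : Int))
    have hklt : k < cs.length := by omega
    have hcast : (k : Int) + 1 = ((k + 1 : ℕ) : Int) := by push_cast; ring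
    have h1 : PySem.List.pyGet? cs (k : Int) = some cs[k] := PySem.List.pyGet?_ofNat cs k hklt
    have h2 : PySem.List.pyGet? cs ((k : Int) + 1) = some cs[k + 1] := by
      rw [hcast]; exact PySem.List.pyGet?_ofNat cs (k+1) hklen
    have ih := pvInnerA_aux cs (k + 1)
    have hdk : cs.drop k = cs[k] :: cs.drop (k + 1) := List.drop_eq_getElem_cons hklt
    have hdk1 : cs.drop (k + 1) = cs[k + 1] :: cs.drop (k + 2) := List.drop_eq_getElem_cons hklen
    have hz : (cs.drop k).zip (cs.drop k).tail
        = (cs[k], cs[k + 1]) :: ((cs.drop (k + 1)).zip (cs.drop (k + 1)).tail) := by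
      conv_lhs => rw [hdk]
      rw [List.tail_cons]
      conv_lhs => rw [hdk1]
      rw [List.zip_cons_cons]
      congr 1
      conv_rhs => rw [hdk1, List.tail_cons]
    rw [PySem.List.pyRange_one_cons hk1, hz, List.any_cons]
    show (if (PySem.List.pyGet? cs (k : Int) == PySem.List.pyGet? cs ((k : Int) + 1)) = true
            then true else pvInnerA cs (PySem.List.pyRange ((k : Int) + 1) ((cs.length : Int) - 1) 1)) = _
    rw [h1, h2, hcast, ih]
    by_cases hab : cs[k] = cs[k + 1]
    · simp [hab]
    · simp [hab]
termination_by cs.length - k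

theorem pvInnerA_eq_pvHat (l : String) :
    pvInnerA l.toList (PySem.List.pyRange 0 ((l.toList.length : Int) - 1) 1) = pvHat l := by
  simpa [pvHat] using pvInnerA_aux l.toList 0

theorem pvOuterA_cons (l : String) (rest : List String) :
    pvOuterA (l :: rest) = if pvHat l then l else pvOuterA rest := by
  simp only [pvOuterA, pvInnerA_eq_pvHat]

theorem pvOuterA_append (xs ys : List String) :
    pvOuterA (xs ++ ys) = if xs.any pvHat then pvOuterA xs else pvOuterA ys := by
  induction xs with
  | nil => simp only [List.nil_append, List.any_nil, Bool.false_eq_true, if_false]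
  | cons l t ih =>
    rw [List.cons_append, pvOuterA_cons, pvOuterA_cons, ih, List.any_cons]
    by_cases h : pvHat l
    · simp [h]
    · by_cases ht : t.any pvHat <;> simp [h, ht]

theorem pvFold_eq (t : List String) (acc : String) :
    t.foldl (fun result s => if pvHat s then s else result) acc
      = if t.any pvHat then pvOuterA t.reverse else acc := by
  induction t generalizing acc with
  | nil => simp
  | cons s t ih =>
    rw [List.foldl_cons, ih, List.reverse_cons, pvOuterA_append, List.any_cons]
    simp only [List.any_reverse]
    by_cases ht : t.any pvHat
    · simp [ht]
    · simp only [ht, Bool.or_false, Bool.false_eq_true, if_false, pvOuterA_cons]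
      by_cases hs : pvHat s <;> simp [hs]

theorem pvOuterA_none (xs : List String) (h : xs.any pvHat = false) : pvOuterA xs = "" := by
  induction xs with
  | nil => rfl
  | cons l t ih =>
    simp only [List.any_cons, Bool.or_eq_false_iff] at h
    rw [pvOuterA_cons, if_neg (by simp [h.1]), ih h.2]

-- ===== VERDICT (by name: the statement is the Claim_ definition above) =====
theorem letzteVerdopplung_spec : Claim_equal_letzteVerdopplung := by
  intro li _
  show letzteVerdopplung li = letzteVerdopplung_alt li
  rw [letzteVerdopplung, letzteVerdopplung_alt, pvFold_eq]
  by_cases h : li.any pvHat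
  · simp [h]
  · rw [if_neg h]
    exact pvOuterA_none li.reverse (by simpa using h)
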